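-- pv_equiv track=rewrite | github.com/zjw131f1fc/geometry-aware-fine-tuning-defense-for-LGM | data/dataset.py | select_views
-- ===== SOURCE A (Python) =====
-- from typing import List, Tuple, Optional, Dict
--
-- def select_views(
--
--     total_views: int,
--     num_input_views: int,
--     transforms_data: dict,
-- ) -> Tuple[List[int], List[int]]:
--
--     # 均匀间隔选择
--     step = total_views // num_input_views
--     input_indices = [i * step for i in range(num_input_views)]
--
--     supervision_indices = [i for i in range(total_views) if i not in input_indices]
--
--     return input_indices, supervision_indices
-- ===== SOURCE B (Python) =====
-- def select_views(total_views, num_input_views, transforms_data):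
--     step = total_views // num_input_views
--     input_indices = [i * step for i in range(num_input_views)]
--     # complement as gaps: walk the selected indices, emitting each gap between them
--     supervision_indices = []
--     last = 0
--     for p in input_indices:
--         if last <= p:
--             supervision_indices.extend(range(last, p))
--             last = p + 1
--     supervision_indices.extend(range(last, total_views))
--     return input_indices, supervision_indices
-- ===== Notes on version B (the rewrite author's own statement) =====
-- stated objective: faster
-- what changed: Instead of scanning every index in range(total_views) and testing list membership, B enumerates the complement directly as the gaps between consecutive selected indices (cursor walk over input_indices), never iterating over unselected indices individually for a membership test.
import Mathlib
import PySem

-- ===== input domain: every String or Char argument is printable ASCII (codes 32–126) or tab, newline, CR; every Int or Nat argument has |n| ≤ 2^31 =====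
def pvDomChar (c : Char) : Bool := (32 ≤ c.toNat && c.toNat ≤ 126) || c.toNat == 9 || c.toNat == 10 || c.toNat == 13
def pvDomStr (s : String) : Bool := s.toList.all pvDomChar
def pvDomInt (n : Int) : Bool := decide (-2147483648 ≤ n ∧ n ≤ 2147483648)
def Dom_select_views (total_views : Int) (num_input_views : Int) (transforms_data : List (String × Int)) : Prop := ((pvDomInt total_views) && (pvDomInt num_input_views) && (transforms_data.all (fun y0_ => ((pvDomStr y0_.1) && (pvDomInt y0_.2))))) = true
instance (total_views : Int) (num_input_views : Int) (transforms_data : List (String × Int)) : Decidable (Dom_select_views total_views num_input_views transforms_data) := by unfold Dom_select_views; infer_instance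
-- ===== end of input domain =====

-- B enumerates the supervision indices as the gaps between consecutive selected indices
-- (cursor walk over input_indices) instead of testing every index of range(total_views)
-- for list membership (objective: faster).

-- ===== PORT A =====
def select_views (total_views : Int) (num_input_views : Int) (transforms_data : List (String × Int)) : List Int × List Int :=
  let step := PySem.Int.floordiv total_views num_input_views
  let input_indices := (PySem.List.pyRange 0 num_input_views 1).map (fun i => i * step)
  let supervision_indices := (PySem.List.pyRange 0 total_views 1).filter (fun i => decide (i ∉ input_indices))
  (input_indices, supervision_indices)

-- ===== PORT B =====
-- the loop body of Source B's for-loop: emit the gap [last, p) and advance the cursor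
def pvGapStep (acc : List Int × Int) (p : Int) : List Int × Int :=
  if acc.2 ≤ p then (acc.1 ++ PySem.List.pyRange acc.2 p 1, p + 1) else acc

def select_views_alt (total_views : Int) (num_input_views : Int) (transforms_data : List (String × Int)) : List Int × List Int :=
  let step := PySem.Int.floordiv total_views num_input_views
  let input_indices := (PySem.List.pyRange 0 num_input_views 1).map (fun i => i * step)
  let acc := input_indices.foldl pvGapStep ([], 0)
  (input_indices, acc.1 ++ PySem.List.pyRange acc.2 total_views 1)

-- ===== PRECONDITION & SPEC =====
-- A divides by num_input_views; Pre_ excludes exactly the ZeroDivisionError input.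
def Pre_select_views (total_views : Int) (num_input_views : Int) (transforms_data : List (String × Int)) : Prop := num_input_views ≠ 0
instance (total_views : Int) (num_input_views : Int) (transforms_data : List (String × Int)) : Decidable (Pre_select_views total_views num_input_views transforms_data) := by unfold Pre_select_views; infer_instance
def pvWitness_select_views : Int × Int × (List (String × Int)) := (10, 3, [])

def Spec_select_views (total_views : Int) (num_input_views : Int) (transforms_data : List (String × Int)) (out : List Int × List Int) : Prop := out = select_views_alt total_views num_input_views transforms_data
instance (total_views : Int) (num_input_views : Int) (transforms_data : List (String × Int)) (out : List Int × List Int) : Decidable (Spec_select_views total_views num_input_views transforms_data out) := by unfold Spec_select_views; infer_instance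

-- ===== CLAIM (what is proved, stated in full; the proofs are below) =====
def Claim_equal_select_views : Prop := ∀ (total_views : Int) (num_input_views : Int) (transforms_data : List (String × Int)), Dom_select_views total_views num_input_views transforms_data → Pre_select_views total_views num_input_views transforms_data → Spec_select_views total_views num_input_views transforms_data (select_views total_views num_input_views transforms_data)

-- ===== LEMMAS AND PROOFS =====

-- The emitted list is an accumulator: it factors out of the fold.
lemma gapFold_factor (l : List Int) (a0 : List Int) (last : Int) :
    l.foldl pvGapStep (a0, last)
      = (a0 ++ (l.foldl pvGapStep ([], last)).1, (l.foldl pvGapStep ([], last)).2) := by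
  induction l generalizing a0 last with
  | nil => simp
  | cons p l ih =>
      simp only [List.foldl_cons, pvGapStep]
      by_cases h : last ≤ p
      · simp only [if_pos h, List.nil_append]
        rw [ih (a0 ++ PySem.List.pyRange last p 1) (p + 1),
            ih (PySem.List.pyRange last p 1) (p + 1)]
        simp
      · simp only [if_neg h]
        exact ih a0 last

-- If every element is below the cursor, the fold does nothing.
lemma gapFold_skip (l : List Int) (a0 : List Int) (last : Int)
    (h : ∀ p ∈ l, p < last) : l.foldl pvGapStep (a0, last) = (a0, last) := by
  induction l with
  | nil => rfl
  | cons p l ih =>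
      simp only [List.foldl_cons, pvGapStep]
      rw [if_neg (by exact not_le.mpr (h p (by simp)))]
      exact ih (fun q hq => h q (by simp [hq]))

-- Gap walk over a strictly increasing in-range list yields the filtered complement.
lemma gapFold_filter (l : List Int) (lo hi : Int)
    (hsorted : l.Pairwise (· < ·))
    (hlo : ∀ p ∈ l, lo ≤ p) (hhi : ∀ p ∈ l, p < hi) :
    (l.foldl pvGapStep ([], lo)).1 ++ PySem.List.pyRange (l.foldl pvGapStep ([], lo)).2 hi 1
      = (PySem.List.pyRange lo hi 1).filter (fun i => decide (i ∉ l)) := by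
  induction l generalizing lo with
  | nil => simp
  | cons p l ih =>
      have hp : lo ≤ p := hlo p (by simp)
      have hph : p < hi := hhi p (by simp)
      have hgt : ∀ q ∈ l, p < q := by
        intro q hq; exact (List.pairwise_cons.mp hsorted).1 q hq
      simp only [List.foldl_cons, pvGapStep, if_pos hp]
      rw [gapFold_factor]
      rw [List.append_assoc]
      rw [ih (p + 1) (List.pairwise_cons.mp hsorted).2
            (fun q hq => by have := hgt q hq; omega)
            (fun q hq => hhi q (by simp [hq]))]
      -- split the right range at p
      rw [PySem.List.pyRange_one_append lo p hi hp (le_of_lt hph)]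
      rw [PySem.List.pyRange_one_cons hph]
      rw [List.filter_append, List.filter_cons]
      have hpf : (decide (p ∉ p :: l)) = false := by simp
      rw [hpf]
      simp only [Bool.false_eq_true, if_false]
      have hleft : List.filter (fun i => decide (i ∉ p :: l)) (PySem.List.pyRange lo p 1)
          = PySem.List.pyRange lo p 1 := by
        rw [List.filter_eq_self]
        intro x hx
        rw [PySem.List.mem_pyRange_one] at hx
        simp only [List.mem_cons, not_or, decide_eq_true_eq]
        exact ⟨by omega, fun hxl => by have := hgt x hxl; omega⟩
      have hright : List.filter (fun i => decide (i ∉ p :: l)) (PySem.List.pyRange (p + 1) hi 1)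
          = List.filter (fun i => decide (i ∉ l)) (PySem.List.pyRange (p + 1) hi 1) := by
        apply List.filter_congr
        intro x hx
        rw [PySem.List.mem_pyRange_one] at hx
        rw [decide_eq_decide]
        simp only [List.mem_cons, not_or]
        exact ⟨fun h => h.2, fun h => ⟨by omega, h⟩⟩
      rw [hleft, hright]
      simp

-- ===== VERDICT (by name: the statement is the Claim_ definition above) =====
theorem select_views_spec : Claim_equal_select_views := by
  intro t n td hdom hpre
  unfold Spec_select_views select_views select_views_alt
  simp only []
  congr 1
  set step := PySem.Int.floordiv t n with hstep
  set input := (PySem.List.pyRange 0 n 1).map (fun i => i * step) with hinput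
  rcases lt_trichotomy n 0 with hn | hn | hn
  · -- n < 0: input empty
    have : input = [] := by
      rw [hinput, PySem.List.pyRange_one_eq_nil (by omega)]; rfl
    rw [this]
    simp
  · exact absurd hn hpre
  · -- n > 0
    by_cases hs : 1 ≤ step
    · -- step ≥ 1: input strictly increasing, all in [0, t)
      have hmul : step * n ≤ t := by
        have := (PySem.Int.le_floordiv_iff_mul_le (a := t) (b := n) (q := step) hn).mp
          (le_of_eq hstep)
        exact this
      symm
      apply gapFold_filter
      · rw [hinput, List.pairwise_map]
        apply List.Pairwise.imp (fun {a b} (h : a < b) => ?_)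
          (PySem.List.pairwise_lt_pyRange_one 0 n)
        exact mul_lt_mul_of_pos_right h (by omega)
      · intro p hp
        rw [hinput, List.mem_map] at hp
        obtain ⟨i, hi, rfl⟩ := hp
        rw [PySem.List.mem_pyRange_one] at hi
        exact mul_nonneg hi.1 (by omega)
      · intro p hp
        rw [hinput, List.mem_map] at hp
        obtain ⟨i, hi, rfl⟩ := hp
        rw [PySem.List.mem_pyRange_one] at hi
        have h1 : i * step ≤ (n - 1) * step :=
          mul_le_mul_of_nonneg_right (by omega) (by omega)
        nlinarith
    · -- step ≤ 0: input = 0 :: (all ≤ 0); both sides are range(1, t)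
      rw [not_le] at hs
      have hcons : input = 0 :: (PySem.List.pyRange 1 n 1).map (fun i => i * step) := by
        rw [hinput, PySem.List.pyRange_one_cons (by omega)]
        simp
      have htail : ∀ p ∈ (PySem.List.pyRange 1 n 1).map (fun i => i * step), p ≤ 0 := by
        intro p hp
        rw [List.mem_map] at hp
        obtain ⟨i, hi, rfl⟩ := hp
        rw [PySem.List.mem_pyRange_one] at hi
        exact mul_nonpos_iff.mpr (Or.inl ⟨by omega, by omega⟩)
      -- B side
      have hB : input.foldl pvGapStep ([], 0) = ([], 1) := by
        rw [hcons]
        simp only [List.foldl_cons, pvGapStep]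
        rw [if_pos (le_refl 0), PySem.List.pyRange_one_eq_nil (le_refl 0)]
        exact gapFold_skip _ _ _ (fun p hp => by have := htail p hp; omega)
      rw [hB]
      simp only [List.nil_append]
      -- A side: filter removes exactly 0
      by_cases ht : t ≤ 0
      · rw [PySem.List.pyRange_one_eq_nil ht, PySem.List.pyRange_one_eq_nil (by omega)]
        simp
      · rw [not_le] at ht
        rw [PySem.List.pyRange_one_cons ht, List.filter_cons]
        have h0 : (decide ((0:Int) ∉ input)) = false := by
          simp [hcons]
        rw [h0]
        simp only [Bool.false_eq_true, if_false]
        rw [List.filter_eq_self.mpr ?_]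
        · norm_num
        · intro x hx
          rw [PySem.List.mem_pyRange_one] at hx
          simp only [decide_eq_true_eq, hcons, List.mem_cons, not_or]
          exact ⟨by omega, fun hxl => by have := htail x hxl; omega⟩
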